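-- pv_equiv track=rewrite | github.com/llu13701/sms_analysis | text_cleanup.py | merge_cat_and_content_pair
-- ===== SOURCE A (Python) =====
-- def merge_cat_and_content_pair(wiki_page_cat_list,full_content_pair,group_wiki_list):
--     """#in a tuple structure, merge everything in the same list into one giant string"""
--     new_merged_cat=[]
--     new_merged_content=[]
--     for keyword_list in group_wiki_list:
--         new_merged_cat.append((keyword_list[0], [item for sublist in [x[1] for x in wiki_page_cat_list if x[0] in keyword_list] for item in sublist]))
--         grouped_content=[x[1] for x in full_content_pair if x[0] in keyword_list]
--         mega_content=''
--         for x in grouped_content: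
--             mega_content=mega_content+x
--         new_merged_content.append((keyword_list[0], mega_content))
--     return new_merged_cat,new_merged_content
-- ===== SOURCE B (Python) =====
-- def merge_cat_and_content_pair(wiki_page_cat_list, full_content_pair, group_wiki_list):
--     """#in a tuple structure, merge everything in the same list into one giant string"""
--     # keyword -> strictly increasing list of group indices it belongs to
--     idx = {}
--     for gi, keyword_list in enumerate(group_wiki_list):
--         for kw in keyword_list:
--             s = idx.setdefault(kw, [])
--             if not s or s[-1] != gi:
--                 s.append(gi)
--     cats = [[] for _ in group_wiki_list]
--     parts = [[] for _ in group_wiki_list]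
--     for k, v in wiki_page_cat_list:
--         for gi in idx.get(k, ()):
--             cats[gi].extend(v)
--     for k, v in full_content_pair:
--         for gi in idx.get(k, ()):
--             parts[gi].append(v)
--     return ([(kl[0], cats[gi]) for gi, kl in enumerate(group_wiki_list)],
--             [(kl[0], ''.join(parts[gi])) for gi, kl in enumerate(group_wiki_list)])
-- ===== Notes on version B (the rewrite author's own statement) =====
-- stated objective: faster
-- what changed: Replaced the per-group rescans of both input lists (membership test against each keyword list) by a keyword->group-indices dictionary built once, then a single pass over each input list distributing entries into per-group accumulators.
import Mathlib
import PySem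

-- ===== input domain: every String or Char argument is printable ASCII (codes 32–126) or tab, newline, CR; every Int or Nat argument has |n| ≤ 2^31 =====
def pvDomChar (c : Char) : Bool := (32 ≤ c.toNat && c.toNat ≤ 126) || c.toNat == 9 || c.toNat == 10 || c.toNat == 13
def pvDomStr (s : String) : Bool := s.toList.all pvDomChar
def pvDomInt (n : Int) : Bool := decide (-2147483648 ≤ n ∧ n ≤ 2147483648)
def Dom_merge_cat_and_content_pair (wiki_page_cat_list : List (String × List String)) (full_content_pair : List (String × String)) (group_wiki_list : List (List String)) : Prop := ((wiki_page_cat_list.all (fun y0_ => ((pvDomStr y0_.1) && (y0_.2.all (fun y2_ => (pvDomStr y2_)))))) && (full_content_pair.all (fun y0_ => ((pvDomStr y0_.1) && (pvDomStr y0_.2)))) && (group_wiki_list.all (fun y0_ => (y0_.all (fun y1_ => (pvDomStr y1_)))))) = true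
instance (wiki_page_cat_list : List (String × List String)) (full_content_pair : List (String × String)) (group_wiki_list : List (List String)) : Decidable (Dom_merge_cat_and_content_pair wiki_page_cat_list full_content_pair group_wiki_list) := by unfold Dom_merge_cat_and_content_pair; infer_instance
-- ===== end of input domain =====

-- B replaces A's per-group rescans of both input lists by a keyword->group-indices
-- dictionary built once and a single distributing pass over each list (objective: faster).

-- ===== PORT A =====
-- literal transliteration of A: for each keyword group, rescan both lists with a
-- membership test, flatten the matching category lists and concatenate the contents.
def merge_cat_and_content_pair (wiki_page_cat_list : List (String × List String)) (full_content_pair : List (String × String)) (group_wiki_list : List (List String)) : (List (String × List String)) × (List (String × String)) :=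
  group_wiki_list.foldl (fun acc keyword_list =>
    -- keyword_list[0]: Python raises IndexError on an empty group; Pre_ excludes that
    let head := (PySem.List.pyGet? keyword_list 0).getD ""
    let cat := ((wiki_page_cat_list.filter (fun x => keyword_list.contains x.1)).map (fun x => x.2)).flatten
    let grouped_content := (full_content_pair.filter (fun x => keyword_list.contains x.1)).map (fun x => x.2)
    let mega_content := grouped_content.foldl (fun m x => m ++ x) ""
    (acc.1 ++ [(head, cat)], acc.2 ++ [(head, mega_content)]))
    ([], [])

-- ===== PORT B =====
-- one step of the index-building inner loop: s = idx.setdefault(kw, []); if not s or s[-1] != gi: s.append(gi)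
def pvIdxAdd (gi : Nat) (d : PySem.Dict String (List Nat)) (kw : String) : PySem.Dict String (List Nat) :=
  let s := d.getD kw []
  if s.getLast? ≠ some gi then d.insert kw (s ++ [gi]) else d

-- for gi, keyword_list in enumerate(group_wiki_list): … (enumerate as an explicit Nat counter)
def pvBuildIdx : Nat → List (List String) → PySem.Dict String (List Nat) → PySem.Dict String (List Nat)
  | _, [], d => d
  | gi, kl :: rest, d => pvBuildIdx (gi+1) rest (kl.foldl (pvIdxAdd gi) d)

-- for k, v in wiki_page_cat_list: for gi in idx.get(k, ()): cats[gi].extend(v)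
def pvDistribCat (idx : PySem.Dict String (List Nat)) (w : List (String × List String)) (cs : List (List String)) : List (List String) :=
  w.foldl (fun cs x => (idx.getD x.1 []).foldl (fun cs gi => cs.modify gi (· ++ x.2)) cs) cs

-- for k, v in full_content_pair: for gi in idx.get(k, ()): parts[gi].append(v)
def pvDistribContent (idx : PySem.Dict String (List Nat)) (f : List (String × String)) (ps : List (List String)) : List (List String) :=
  f.foldl (fun ps x => (idx.getD x.1 []).foldl (fun ps gi => ps.modify gi (· ++ [x.2])) ps) ps

-- [(kl[0], cats[gi]) for gi, kl in enumerate(group_wiki_list)]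
def pvFinalCat : Nat → List (List String) → List (List String) → List (String × List String)
  | _, [], _ => []
  | gi, kl :: rest, cats => ((PySem.List.pyGet? kl 0).getD "", cats.getD gi []) :: pvFinalCat (gi+1) rest cats

-- [(kl[0], ''.join(parts[gi])) for gi, kl in enumerate(group_wiki_list)]
def pvFinalContent : Nat → List (List String) → List (List String) → List (String × String)
  | _, [], _ => []
  | gi, kl :: rest, parts => ((PySem.List.pyGet? kl 0).getD "", String.join (parts.getD gi [])) :: pvFinalContent (gi+1) rest parts

def merge_cat_and_content_pair_alt (wiki_page_cat_list : List (String × List String)) (full_content_pair : List (String × String)) (group_wiki_list : List (List String)) : (List (String × List String)) × (List (String × String)) :=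
  let idx := pvBuildIdx 0 group_wiki_list PySem.Dict.empty
  let cats := pvDistribCat idx wiki_page_cat_list (group_wiki_list.map (fun _ => []))
  let parts := pvDistribContent idx full_content_pair (group_wiki_list.map (fun _ => []))
  (pvFinalCat 0 group_wiki_list cats, pvFinalContent 0 group_wiki_list parts)

-- ===== PRECONDITION & SPEC =====
-- Pre_ excludes inputs with an empty keyword group, on which Python A raises IndexError at keyword_list[0] (B raises there too).
def Pre_merge_cat_and_content_pair (wiki_page_cat_list : List (String × List String)) (full_content_pair : List (String × String)) (group_wiki_list : List (List String)) : Prop :=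
  ∀ kl ∈ group_wiki_list, kl ≠ []
instance (wiki_page_cat_list : List (String × List String)) (full_content_pair : List (String × String)) (group_wiki_list : List (List String)) : Decidable (Pre_merge_cat_and_content_pair wiki_page_cat_list full_content_pair group_wiki_list) := by unfold Pre_merge_cat_and_content_pair; infer_instance

def pvWitness_merge_cat_and_content_pair : (List (String × List String)) × (List (String × String)) × List (List String) :=
  ([("cat", ["a", "b"]), ("dog", ["c"])], [("cat", "meow"), ("dog", "woof")], [["cat", "dog"], ["dog"]])

def Spec_merge_cat_and_content_pair (wiki_page_cat_list : List (String × List String)) (full_content_pair : List (String × String)) (group_wiki_list : List (List String)) (out : (List (String × List String)) × (List (String × String))) : Prop := out = merge_cat_and_content_pair_alt wiki_page_cat_list full_content_pair group_wiki_list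
instance (wiki_page_cat_list : List (String × List String)) (full_content_pair : List (String × String)) (group_wiki_list : List (List String)) (out : (List (String × List String)) × (List (String × String))) : Decidable (Spec_merge_cat_and_content_pair wiki_page_cat_list full_content_pair group_wiki_list out) := by unfold Spec_merge_cat_and_content_pair; infer_instance

-- ===== CLAIM (what is proved, stated in full; the proofs are below) =====
def Claim_equal_merge_cat_and_content_pair : Prop := ∀ (wiki_page_cat_list : List (String × List String)) (full_content_pair : List (String × String)) (group_wiki_list : List (List String)), Dom_merge_cat_and_content_pair wiki_page_cat_list full_content_pair group_wiki_list → Pre_merge_cat_and_content_pair wiki_page_cat_list full_content_pair group_wiki_list → Spec_merge_cat_and_content_pair wiki_page_cat_list full_content_pair group_wiki_list (merge_cat_and_content_pair wiki_page_cat_list full_content_pair group_wiki_list)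

-- ===== LEMMAS AND PROOFS =====

-- A's fold appends one pair to each output list per group: it is a pair of maps.
theorem pvA_shape (w : List (String × List String)) (f : List (String × String)) (g : List (List String)) (a : List (String × List String)) (b : List (String × String)) :
    g.foldl (fun acc keyword_list =>
      (acc.1 ++ [(((PySem.List.pyGet? keyword_list 0).getD ""), ((w.filter (fun x => keyword_list.contains x.1)).map (fun x => x.2)).flatten)],
       acc.2 ++ [(((PySem.List.pyGet? keyword_list 0).getD ""), ((f.filter (fun x => keyword_list.contains x.1)).map (fun x => x.2)).foldl (fun m x => m ++ x) "")])) (a, b)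
    = (a ++ g.map (fun kl => (((PySem.List.pyGet? kl 0).getD ""), ((w.filter (fun x => kl.contains x.1)).map (fun x => x.2)).flatten)),
       b ++ g.map (fun kl => (((PySem.List.pyGet? kl 0).getD ""), ((f.filter (fun x => kl.contains x.1)).map (fun x => x.2)).foldl (fun m x => m ++ x) ""))) := by
  induction g generalizing a b with
  | nil => simp
  | cons kl rest ih =>
    rw [List.foldl_cons, ih]
    simp

-- the inner index-building loop over one keyword list, pointwise on every key
theorem pvIdxAdd_fold (gi : Nat) (kl : List String) (d : PySem.Dict String (List Nat)) (k : String) :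
    ((kl.foldl (pvIdxAdd gi) d).getD k []) =
      if k ∈ kl ∧ (d.getD k []).getLast? ≠ some gi then d.getD k [] ++ [gi] else d.getD k [] := by
  induction kl generalizing d with
  | nil => simp
  | cons kw rest ih =>
    rw [List.foldl_cons, ih]
    have hd' : (pvIdxAdd gi d kw).getD k [] = if k = kw ∧ (d.getD kw []).getLast? ≠ some gi then d.getD kw [] ++ [gi] else d.getD k [] := by
      simp only [pvIdxAdd]
      split
      · rw [PySem.Dict.getD_insert]
        by_cases hk : k = kw <;> simp_all
      · by_cases hk : k = kw <;> simp_all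
    rw [hd']
    by_cases hk : k = kw
    · subst hk
      by_cases hl : (d.getD k []).getLast? = some gi
      · simp [hl]
      · simp [hl, List.mem_cons]
    · simp [hk, List.mem_cons]

-- the full index build: strictly increasing per-key lists whose members are exactly
-- the group indices the key belongs to
theorem pvBuildIdx_spec (g : List (List String)) (gi : Nat) (d : PySem.Dict String (List Nat))
    (Hb : ∀ k x, x ∈ d.getD k [] → x < gi)
    (Hc : ∀ k, (d.getD k []).IsChain (· < ·)) :
    (∀ k, ((pvBuildIdx gi g d).getD k []).IsChain (· < ·)) ∧
    (∀ k j, j ∈ (pvBuildIdx gi g d).getD k [] ↔ j ∈ d.getD k [] ∨ ∃ n, ∃ h : n < g.length, j = gi + n ∧ k ∈ g[n]) := by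
  induction g generalizing gi d with
  | nil => simpa [pvBuildIdx] using Hc
  | cons kl rest ih =>
    have hstep : ∀ k, ((kl.foldl (pvIdxAdd gi) d).getD k []) =
        if k ∈ kl then d.getD k [] ++ [gi] else d.getD k [] := by
      intro k
      rw [pvIdxAdd_fold]
      have hne : (d.getD k []).getLast? ≠ some gi := by
        intro h
        exact absurd (Hb k gi (List.mem_of_getLast? h)) (lt_irrefl gi)
      by_cases hm : k ∈ kl <;> simp [hm, hne]
    have Hb' : ∀ k x, x ∈ (kl.foldl (pvIdxAdd gi) d).getD k [] → x < gi + 1 := by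
      intro k x hx
      rw [hstep] at hx
      split at hx
      · rcases List.mem_append.mp hx with h | h
        · exact Nat.lt_succ_of_lt (Hb k x h)
        · simp at h; omega
      · exact Nat.lt_succ_of_lt (Hb k x hx)
    have Hc' : ∀ k, ((kl.foldl (pvIdxAdd gi) d).getD k []).IsChain (· < ·) := by
      intro k
      rw [hstep]
      split
      · rw [List.isChain_append]
        refine ⟨Hc k, by simp, ?_⟩
        intro x hx y hy
        simp at hy; subst hy
        exact Hb k x (List.mem_of_getLast? hx)
      · exact Hc k
    obtain ⟨ihc, ihm⟩ := ih (gi + 1) _ Hb' Hc'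
    refine ⟨ihc, ?_⟩
    intro k j
    rw [pvBuildIdx, ihm k j, hstep]
    constructor
    · rintro (h | ⟨n, hn, rfl, hk⟩)
      · split at h
        · rcases List.mem_append.mp h with h' | h'
          · exact Or.inl h'
          · simp at h'; subst h'
            exact Or.inr ⟨0, by simp, by simp, by assumption⟩
        · exact Or.inl h
      · exact Or.inr ⟨n + 1, by simpa using hn, by omega, by simpa using hk⟩
    · rintro (h | ⟨n, hn, rfl, hk⟩)
      · left; split
        · exact List.mem_append.mpr (Or.inl h)
        · exact h
      · cases n with
        | zero =>
          left
          simp only [List.getElem_cons_zero] at hk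
          simp [hk]
        | succ m =>
          right
          exact ⟨m, by simpa using hn, by omega, by simpa using hk⟩

-- membership in the built index list is exactly group membership; the lists have no duplicates
theorem pvIdx_mem (g : List (List String)) (k : String) (j : Nat) :
    j ∈ (pvBuildIdx 0 g PySem.Dict.empty).getD k [] ↔ ∃ h : j < g.length, k ∈ g[j] := by
  obtain ⟨_, hm⟩ := pvBuildIdx_spec g 0 PySem.Dict.empty (by simp) (by simp)
  rw [hm]
  simp only [PySem.Dict.getD_empty, List.not_mem_nil, false_or]
  constructor
  · rintro ⟨n, hn, rfl, hk⟩; exact ⟨by simpa using hn, by simpa using hk⟩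
  · rintro ⟨h, hk⟩; exact ⟨j, h, by omega, hk⟩

theorem pvIdx_nodup (g : List (List String)) (k : String) :
    ((pvBuildIdx 0 g PySem.Dict.empty).getD k []).Nodup := by
  obtain ⟨hc, _⟩ := pvBuildIdx_spec g 0 PySem.Dict.empty (by simp) (by simp)
  exact ((List.isChain_iff_pairwise.mp (hc k)).imp (fun h => Nat.ne_of_lt h))

-- a pass of modifies at distinct indices, seen at one position
theorem pvFold_modify_getElem? (L : List Nat) (hL : L.Nodup) (u : List String) (cs : List (List String)) (j : Nat) :
    (L.foldl (fun cs gi => cs.modify gi (· ++ u)) cs)[j]? =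
      if j ∈ L then (cs[j]?).map (· ++ u) else cs[j]? := by
  induction L generalizing cs with
  | nil => simp
  | cons gi rest ih =>
    have hnd := List.nodup_cons.mp hL
    rw [List.foldl_cons, ih hnd.2]
    by_cases hj : j = gi
    · subst hj
      simp [hnd.1]
    · by_cases hm : j ∈ rest <;>
        simp [hm, hj, List.mem_cons, Ne.symm hj]

-- the distributing pass, seen at one group index: it accumulates exactly the
-- payloads of the entries whose key lies in that group's keyword list
theorem pvDistrib_getElem? {α : Type} (g : List (List String)) (key : α → String) (pay : α → List String)
    (xs : List α) (cs : List (List String)) (j : Nat) (hj : j < g.length) :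
    (xs.foldl (fun cs x => ((pvBuildIdx 0 g PySem.Dict.empty).getD (key x) []).foldl (fun cs gi => cs.modify gi (· ++ pay x)) cs) cs)[j]? =
      (cs[j]?).map (fun a => a ++ ((xs.filter (fun x => (g[j]).contains (key x))).map pay).flatten) := by
  induction xs generalizing cs with
  | nil => cases h : cs[j]? <;> simp [h]
  | cons x rest ih =>
    rw [List.foldl_cons, ih]
    rw [pvFold_modify_getElem? _ (pvIdx_nodup g (key x))]
    by_cases hm : (key x) ∈ g[j]
    · have : j ∈ (pvBuildIdx 0 g PySem.Dict.empty).getD (key x) [] := (pvIdx_mem g _ j).mpr ⟨hj, hm⟩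
      simp only [this, if_pos]
      have hc : (g[j]).contains (key x) = true := by simpa using hm
      cases h : cs[j]? <;> simp [h, hm]
    · have : ¬ j ∈ (pvBuildIdx 0 g PySem.Dict.empty).getD (key x) [] := by
        rw [pvIdx_mem]; rintro ⟨_, h⟩; exact hm h
      simp only [this, if_neg, not_false_iff]
      have hc : (g[j]).contains (key x) = false := by simpa using hm
      cases h : cs[j]? <;> simp [h, hm]

-- assembling the outputs: pvFinalCat/pvFinalContent are A's maps when the
-- accumulator holds the right value at every index
theorem pvFinalCat_eq (w : List (String × List String)) (g' : List (List String)) (gi : Nat) (cats : List (List String))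
    (H : ∀ n (h : n < g'.length), cats.getD (gi + n) [] = ((w.filter (fun x => (g'[n]).contains x.1)).map (fun x => x.2)).flatten) :
    pvFinalCat gi g' cats = g'.map (fun kl => (((PySem.List.pyGet? kl 0).getD ""), ((w.filter (fun x => kl.contains x.1)).map (fun x => x.2)).flatten)) := by
  induction g' generalizing gi with
  | nil => rfl
  | cons kl rest ih =>
    rw [pvFinalCat, List.map_cons]
    have h0 := H 0 (by simp)
    simp only [Nat.add_zero, List.getElem_cons_zero] at h0
    rw [h0, ih (gi + 1) (fun n h => by simpa [Nat.add_assoc, Nat.add_comm 1 n] using H (n + 1) (by simpa using h))]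

theorem pvFinalContent_eq (f : List (String × String)) (g' : List (List String)) (gi : Nat) (parts : List (List String))
    (H : ∀ n (h : n < g'.length), parts.getD (gi + n) [] = (f.filter (fun x => (g'[n]).contains x.1)).map (fun x => x.2)) :
    pvFinalContent gi g' parts = g'.map (fun kl => (((PySem.List.pyGet? kl 0).getD ""), ((f.filter (fun x => kl.contains x.1)).map (fun x => x.2)).foldl (fun m x => m ++ x) "")) := by
  induction g' generalizing gi with
  | nil => rfl
  | cons kl rest ih =>
    rw [pvFinalContent, List.map_cons]
    have h0 := H 0 (by simp)
    simp only [Nat.add_zero, List.getElem_cons_zero] at h0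
    rw [h0, ih (gi + 1) (fun n h => by simpa [Nat.add_assoc, Nat.add_comm 1 n] using H (n + 1) (by simpa using h))]
    rfl

theorem pvFlatten_singletons {α β : Type} (h : α → β) : ∀ l : List α, (l.map (fun x => [h x])).flatten = l.map h
  | [] => rfl
  | x :: xs => by simp [pvFlatten_singletons h xs]

-- ===== VERDICT (by name: the statement is the Claim_ definition above) =====
theorem merge_cat_and_content_pair_spec : Claim_equal_merge_cat_and_content_pair := by
  intro w f g _ _
  unfold Spec_merge_cat_and_content_pair merge_cat_and_content_pair merge_cat_and_content_pair_alt
  rw [pvA_shape]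
  simp only [List.nil_append]
  refine Prod.ext ?_ ?_
  · rw [pvFinalCat_eq w g 0]
    intro n hn
    have := pvDistrib_getElem? g (fun x => x.1) (fun x => x.2) w (g.map (fun _ => ([] : List String))) n (by simpa using hn)
    unfold pvDistribCat
    simp only [Nat.zero_add]
    rw [List.getD_eq_getElem?_getD, this]
    simp [(by simpa using hn : n < g.length)]
  · rw [pvFinalContent_eq f g 0]
    intro n hn
    have := pvDistrib_getElem? g (fun x => x.1) (fun x => [x.2]) f (g.map (fun _ => ([] : List String))) n (by simpa using hn)
    unfold pvDistribContent
    simp only [Nat.zero_add]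
    rw [List.getD_eq_getElem?_getD, this]
    simp [(by simpa using hn : n < g.length), pvFlatten_singletons]
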